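-- pv_equiv track=rewrite | github.com/PKTwentyTwo/pocketlife | ruleloader.py | istransition
-- ===== SOURCE A (Python) =====
-- def istransition(line, knownvars={}):
--     '''Determines whether a line is likely to be specifying a transition.'''
--     characters = [x for x in knownvars]
--     characters += [' ', ',']
--     characters += [str(x) for x in range(10)]
--     for n in line:
--         if n not in characters:
--             return False
--     if line.count(',') != 9:
--         return False
--     return True
-- ===== SOURCE B (Python) =====
-- def istransition(line, knownvars={}):
--     '''Determines whether a line is likely to be specifying a transition.'''
--     allowed = set(' 0123456789').union(k for k in knownvars if len(k) == 1)
--     fields = line.split(',')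
--     return len(fields) == 10 and all(set(field) <= allowed for field in fields)
-- ===== Notes on version B (the rewrite author's own statement) =====
-- stated objective: alternative
-- what changed: B splits the line at commas and checks that there are exactly 10 fields and that each field's character set is a subset of one precomputed allowed set (digits, space, single-char knownvars keys), instead of A's per-character membership loop over a freshly built candidate list followed by a separate comma count.
import Mathlib
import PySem

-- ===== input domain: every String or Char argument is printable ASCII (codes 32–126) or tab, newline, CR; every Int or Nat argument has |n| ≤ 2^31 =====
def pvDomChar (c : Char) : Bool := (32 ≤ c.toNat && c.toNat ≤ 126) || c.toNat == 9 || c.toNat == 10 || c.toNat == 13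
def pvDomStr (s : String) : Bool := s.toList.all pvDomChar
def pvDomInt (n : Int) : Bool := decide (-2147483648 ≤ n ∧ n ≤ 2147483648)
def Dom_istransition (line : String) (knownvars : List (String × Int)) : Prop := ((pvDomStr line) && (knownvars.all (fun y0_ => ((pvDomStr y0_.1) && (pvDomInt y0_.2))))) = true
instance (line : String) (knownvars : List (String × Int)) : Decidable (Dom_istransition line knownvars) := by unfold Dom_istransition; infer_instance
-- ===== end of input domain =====

-- B splits the line at commas and checks 10 fields whose character sets lie in one precomputed
-- allowed set, instead of A's per-character candidate-list scan plus a separate comma count.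

-- ===== PORT A =====
-- Python 'x in xs' on a list of strings: equality of the character sequences (exact for str)
def pyStrMem (s : List Char) (xs : List String) : Bool := xs.any (fun t => t.toList == s)

-- characters = [x for x in knownvars] + [' ', ','] + [str(x) for x in range(10)]
def charactersA (knownvars : List (String × Int)) : List String :=
  (PySem.Dict.mk knownvars).keys ++ [" ", ","] ++ ((PySem.List.pyRange 0 10 1).map PySem.Int.toStr)

def istransition (line : String) (knownvars : List (String × Int)) : Bool :=
  let characters := charactersA knownvars
  -- for n in line: if n not in characters: return False
  if line.toList.all (fun n => pyStrMem [n] characters) then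
    if PySem.Str.count line "," != 9 then false else true
  else false

-- ===== PORT B =====
-- allowed = set(' 0123456789').union(k for k in knownvars if len(k) == 1)
def allowedB (knownvars : List (String × Int)) : PySem.Set String :=
  PySem.Set.update (PySem.Set.ofList ((" 0123456789").toList.map (fun c => String.ofList [c])))
    (((PySem.Dict.mk knownvars).keys).filter (fun k => PySem.Str.len k == 1))

def istransition_alt (line : String) (knownvars : List (String × Int)) : Bool :=
  let allowed := allowedB knownvars
  -- fields = line.split(',')   (sep is the non-empty literal ",")
  let fields := PySem.Chars.splitOn line.toList [',']
  -- len(fields) == 10 and all(set(field) <= allowed for field in fields)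
  (fields.length == 10) && fields.all (fun f =>
    PySem.Set.issubset (PySem.Set.ofList (f.map (fun c => String.ofList [c]))) allowed)

-- ===== PRECONDITION & SPEC =====
def Spec_istransition (line : String) (knownvars : List (String × Int)) (out : Bool) : Prop := out = istransition_alt line knownvars
instance (line : String) (knownvars : List (String × Int)) (out : Bool) : Decidable (Spec_istransition line knownvars out) := by unfold Spec_istransition; infer_instance

-- ===== CLAIM (what is proved, stated in full; the proofs are below) =====
def Claim_equal_istransition : Prop := ∀ (line : String) (knownvars : List (String × Int)), Dom_istransition line knownvars → Spec_istransition line knownvars (istransition line knownvars)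

-- ===== LEMMAS AND PROOFS =====

-- str.count's worker, for a single-character needle, counts occurrences of that character
theorem count_go_singleton (c : Char) (l : List Char) : ∀ (fuel acc : Nat), l.length ≤ fuel →
    PySem.Chars.count.go [c] fuel l acc = acc + l.count c := by
  induction l with
  | nil =>
    intro fuel acc _
    cases fuel <;> simp [PySem.Chars.count.go]
  | cons h t ih =>
    intro fuel acc hf
    cases fuel with
    | zero => simp at hf
    | succ n =>
      rw [PySem.Chars.count.go]
      by_cases hc : c = h
      · subst hc
        simp only [List.isPrefixOf, BEq.rfl, Bool.true_and, if_pos]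
        simp only [List.length_cons, List.length_nil, Nat.zero_add, List.drop_succ_cons,
          List.drop_zero]
        rw [ih n (acc + 1) (by simp only [List.length_cons] at hf; omega)]
        simp
        omega
      · have hpre : ([c].isPrefixOf (h :: t)) = false := by
          simp [List.isPrefixOf]
          exact hc
        rw [hpre]
        simp only [Bool.false_eq_true, if_false]
        rw [ih n acc (by simp only [List.length_cons] at hf; omega)]
        have hne : ¬ ((h : Char) = c) := fun hh => hc hh.symm
        simp [hne]

theorem count_comma (l : List Char) : PySem.Chars.count l [','] = l.count ',' := by
  rw [PySem.Chars.count]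
  simp only [List.isEmpty_cons, Bool.false_eq_true, if_false]
  rw [count_go_singleton ',' l l.length 0 le_rfl]
  omega

-- a char equals one of '0'..'9' iff isDigit
theorem digit_disj (c : Char) :
    (c == '0' || c == '1' || c == '2' || c == '3' || c == '4'
      || c == '5' || c == '6' || c == '7' || c == '8' || c == '9') = c.isDigit := by
  rw [Bool.eq_iff_iff]
  simp only [Bool.or_eq_true, beq_iff_eq, Char.isDigit, Bool.and_eq_true, decide_eq_true_eq]
  constructor
  · rintro (((((((((rfl|rfl)|rfl)|rfl)|rfl)|rfl)|rfl)|rfl)|rfl)|rfl) <;> exact ⟨by decide, by decide⟩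
  · rintro ⟨h1, h2⟩
    have l1 := UInt32.le_iff_toNat_le_toNat.mp h1
    have l2 := UInt32.le_iff_toNat_le_toNat.mp h2
    have e1 : ('0' : Char).val.toNat = 48 := rfl
    have e2 : ('9' : Char).val.toNat = 57 := rfl
    rw [e1] at l1
    rw [e2] at l2
    have hc : ∀ d : Char, c.val.toNat = d.val.toNat → c = d := fun d h => Char.ext (UInt32.ext h)
    have hd : c.val.toNat = 48 ∨ c.val.toNat = 49 ∨ c.val.toNat = 50 ∨ c.val.toNat = 51 ∨
        c.val.toNat = 52 ∨ c.val.toNat = 53 ∨ c.val.toNat = 54 ∨ c.val.toNat = 55 ∨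
        c.val.toNat = 56 ∨ c.val.toNat = 57 := by omega
    rcases hd with h|h|h|h|h|h|h|h|h|h
    · have := hc '0' h; tauto
    · have := hc '1' h; tauto
    · have := hc '2' h; tauto
    · have := hc '3' h; tauto
    · have := hc '4' h; tauto
    · have := hc '5' h; tauto
    · have := hc '6' h; tauto
    · have := hc '7' h; tauto
    · have := hc '8' h; tauto
    · have := hc '9' h; tauto

theorem toList_beq_singleton (t : String) (c : Char) :
    (t.toList == [c]) = (t == String.ofList [c]) := by
  rw [Bool.eq_iff_iff]
  simp [← String.toList_inj]

-- A's per-character test, with the comma case split off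
theorem mem_characters (kv : List (String × Int)) (c : Char) :
    pyStrMem [c] (charactersA kv)
      = (c == ',' || (c.isDigit || c == ' '
          || PySem.Dict.contains (PySem.Dict.mk kv) (String.ofList [c]))) := by
  have hdig : ((PySem.List.pyRange 0 10 1).map PySem.Int.toStr)
      = ["0", "1", "2", "3", "4", "5", "6", "7", "8", "9"] := by decide
  have hco : PySem.Dict.contains (PySem.Dict.mk kv) (String.ofList [c])
      = kv.any (fun p => p.1 == String.ofList [c]) := by
    simp [PySem.Dict.contains]
  have hk : (PySem.Dict.mk kv).keys = kv.map (fun p => p.1) := by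
    simp [PySem.Dict.keys]
  rw [← digit_disj c]
  unfold pyStrMem charactersA
  rw [hdig, hco, hk, Bool.eq_iff_iff]
  simp only [List.any_append, List.any_map, List.any_cons, List.any_nil, Function.comp_def,
    toList_beq_singleton,
    show (" " : String) = String.ofList [' '] from by decide,
    show ("," : String) = String.ofList [','] from by decide,
    show ("0" : String) = String.ofList ['0'] from by decide,
    show ("1" : String) = String.ofList ['1'] from by decide,
    show ("2" : String) = String.ofList ['2'] from by decide,
    show ("3" : String) = String.ofList ['3'] from by decide,
    show ("4" : String) = String.ofList ['4'] from by decide,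
    show ("5" : String) = String.ofList ['5'] from by decide,
    show ("6" : String) = String.ofList ['6'] from by decide,
    show ("7" : String) = String.ofList ['7'] from by decide,
    show ("8" : String) = String.ofList ['8'] from by decide,
    show ("9" : String) = String.ofList ['9'] from by decide,
    show ∀ d : Char, (String.ofList [d] == String.ofList [c]) = (c == d) from
      fun d => by rw [Bool.eq_iff_iff]; simp [String.ofList_inj]; exact eq_comm,
    Bool.or_eq_true, Bool.or_false, List.any_eq_true, beq_iff_eq]
  generalize (∃ x ∈ kv, x.1 = String.ofList [c]) = P
  tauto

-- proof-side model of splitting a char list on ',' : (first field, remaining fields)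
def splitC : List Char → List Char × List (List Char)
  | [] => ([], [])
  | c :: r =>
    let p := splitC r
    if c = ',' then ([], p.1 :: p.2) else (c :: p.1, p.2)

theorem splitOn_go_comma (l : List Char) : ∀ (fuel : Nat) (cur : List Char) (acc : List (List Char)),
    l.length < fuel →
    PySem.Chars.splitOn.go [','] fuel l cur acc
      = acc.reverse ++ (cur.reverse ++ (splitC l).1) :: (splitC l).2 := by
  induction l with
  | nil =>
    intro fuel cur acc hf
    cases fuel with
    | zero => omega
    | succ n => simp [PySem.Chars.splitOn.go, splitC]
  | cons c r ih =>
    intro fuel cur acc hf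
    cases fuel with
    | zero => omega
    | succ n =>
      rw [PySem.Chars.splitOn.go]
      by_cases hc : c = ','
      · subst hc
        rw [if_pos (by simp [List.isPrefixOf])]
        simp only [List.length_cons, List.drop_succ_cons, List.length_nil, List.drop_zero]
        rw [ih n [] (cur.reverse :: acc) (by simp at hf; omega)]
        simp [splitC]
      · rw [if_neg (by simp [List.isPrefixOf]; exact fun h => absurd h.symm hc)]
        rw [ih n (c :: cur) acc (by simp at hf; omega)]
        simp [splitC, hc]

theorem splitOn_comma (l : List Char) :
    PySem.Chars.splitOn l [','] = ((splitC l).1 :: (splitC l).2) := by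
  rw [PySem.Chars.splitOn, splitOn_go_comma l (l.length + 1) [] [] (by omega)]
  simp

-- the number of fields after the first equals the comma count
theorem splitC_snd_length (l : List Char) : (splitC l).2.length = l.count ',' := by
  induction l with
  | nil => simp [splitC]
  | cons c r ih =>
    by_cases hc : c = ','
    · subst hc; simp [splitC, ih]
    · simp [splitC, hc, ih]

-- per-field validation of the split equals per-character validation with ',' allowed
theorem splitC_all (ok : Char → Bool) (l : List Char) :
    (((splitC l).1 :: (splitC l).2).all (fun f => f.all ok))
      = l.all (fun c => c == ',' || ok c) := by
  induction l with
  | nil => simp [splitC]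
  | cons c r ih =>
    by_cases hc : c = ','
    · subst hc
      simp only [splitC, List.all_cons] at *
      simp [← ih]
    · simp only [splitC, if_neg hc, List.all_cons] at *
      rw [← ih]
      rw [Bool.eq_iff_iff]
      simp [hc]
      tauto

-- B's subset test on one field = every char of the field passes A's non-comma test
theorem field_subset_eq (kv : List (String × Int)) (f : List Char) :
    PySem.Set.issubset (PySem.Set.ofList (f.map (fun c => String.ofList [c]))) (allowedB kv)
      = f.all (fun c => c.isDigit || c == ' '
          || PySem.Dict.contains (PySem.Dict.mk kv) (String.ofList [c])) := by
  rw [Bool.eq_iff_iff, PySem.Set.issubset_iff, List.all_eq_true]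
  have hmem : ∀ c : Char, (String.ofList [c] ∈ allowedB kv)
      ↔ (c.isDigit || c == ' '
          || PySem.Dict.contains (PySem.Dict.mk kv) (String.ofList [c])) = true := by
    intro c
    unfold allowedB
    rw [PySem.Set.mem_update, PySem.Set.mem_ofList]
    have hbase : (String.ofList [c] ∈ ((" 0123456789").toList.map (fun c => String.ofList [c])))
        ↔ (c == ' ' || c.isDigit) = true := by
      simp only [List.mem_map]
      constructor
      · rintro ⟨d, hd, he⟩
        rw [String.ofList_inj] at he
        have hdc : d = c := by simpa using he
        rw [show (" 0123456789").toList = [' ','0','1','2','3','4','5','6','7','8','9'] from by decide] at hd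
        rw [← hdc, ← digit_disj d]
        fin_cases hd <;> decide
      · intro h
        refine ⟨c, ?_, rfl⟩
        rw [← digit_disj c] at h
        rw [show (" 0123456789").toList = [' ','0','1','2','3','4','5','6','7','8','9'] from by decide]
        rcases Bool.or_eq_true .. |>.mp h with h1 | h1
        · simp only [beq_iff_eq] at h1; simp [h1]
        · rcases Bool.or_eq_true .. |>.mp h1 with h2 | h2
          · rcases Bool.or_eq_true .. |>.mp h2 with h3 | h3
            · rcases Bool.or_eq_true .. |>.mp h3 with h4 | h4
              · rcases Bool.or_eq_true .. |>.mp h4 with h5 | h5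
                · rcases Bool.or_eq_true .. |>.mp h5 with h6 | h6
                  · rcases Bool.or_eq_true .. |>.mp h6 with h7 | h7
                    · rcases Bool.or_eq_true .. |>.mp h7 with h8 | h8
                      · rcases Bool.or_eq_true .. |>.mp h8 with h9 | h9
                        · rcases Bool.or_eq_true .. |>.mp h9 with h10 | h10 <;>
                            (simp only [beq_iff_eq] at h10; simp [h10])
                        · simp only [beq_iff_eq] at h9; simp [h9]
                      · simp only [beq_iff_eq] at h8; simp [h8]
                    · simp only [beq_iff_eq] at h7; simp [h7]
                  · simp only [beq_iff_eq] at h6; simp [h6]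
                · simp only [beq_iff_eq] at h5; simp [h5]
              · simp only [beq_iff_eq] at h4; simp [h4]
            · simp only [beq_iff_eq] at h3; simp [h3]
          · simp only [beq_iff_eq] at h2; simp [h2]
    have hkeys : (String.ofList [c] ∈ ((PySem.Dict.mk kv).keys).filter (fun k => PySem.Str.len k == 1))
        ↔ PySem.Dict.contains (PySem.Dict.mk kv) (String.ofList [c]) = true := by
      rw [List.mem_filter]
      have hlen : (PySem.Str.len (String.ofList [c]) == 1) = true := by simp
      rw [PySem.Dict.contains_eq_decide_mem_keys]
      simp only [hlen, and_true, decide_eq_true_eq]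
    rw [hbase, hkeys]
    rw [Bool.or_eq_true, Bool.or_eq_true, Bool.or_eq_true]
    tauto
  constructor
  · intro h c hc
    exact (hmem c).mp (h _ ((PySem.Set.mem_ofList _ _).mpr (List.mem_map_of_mem hc)))
  · intro h s hs
    rw [PySem.Set.mem_ofList, List.mem_map] at hs
    obtain ⟨c, hc, rfl⟩ := hs
    exact (hmem c).mpr (h c hc)

-- ===== VERDICT (by name: the statement is the Claim_ definition above) =====
theorem istransition_spec : Claim_equal_istransition := by
  intro line kv _
  unfold Spec_istransition istransition istransition_alt
  rw [splitOn_comma]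
  have hcount : PySem.Str.count line "," = line.toList.count ',' := by
    simpa using count_comma line.toList
  simp only [hcount]
  rw [show (((splitC line.toList).1 :: (splitC line.toList).2).length)
        = line.toList.count ',' + 1 from by simp [splitC_snd_length]]
  conv_rhs => rw [show (fun f : List Char =>
      PySem.Set.issubset (PySem.Set.ofList (f.map (fun c => String.ofList [c]))) (allowedB kv))
    = (fun f : List Char => f.all (fun c => c.isDigit || c == ' '
          || PySem.Dict.contains (PySem.Dict.mk kv) (String.ofList [c]))) from
    funext (fun f => field_subset_eq kv f)]
  rw [splitC_all]
  simp only [← mem_characters]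
  by_cases hall : line.toList.all (fun n => pyStrMem [n] (charactersA kv)) = true
  · rw [if_pos (by simpa [charactersA] using hall), hall, Bool.and_true]
    by_cases h : line.toList.count ',' = 9
    · simp [h]
    · rw [Bool.eq_iff_iff]
      simp [h]
  · rw [if_neg (by simpa [charactersA] using hall)]
    rw [Bool.not_eq_true] at hall
    rw [hall, Bool.and_false]
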